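-- pv_equiv track=rewrite | github.com/NoahQue/KeywordAnalysis | code/keyCount.py | switch_case_count
-- ===== SOURCE A (Python) =====
-- def switch_case_count(key_data):
--     case_num = []
--     switch_num = 0
--     temp_case = 0
--     for value in key_data:
--         if value == "switch":
--             if switch_num > 0:
--                 case_num.append(temp_case)
--                 temp_case = 0
--             switch_num += 1
--
--         if value == "case":
--             temp_case += 1
--     case_num.append(temp_case)
--
--     # 处理不带有case的switch
--     num = case_num.count(0)
--     for i in range(num):
--         case_num.remove(0)
--     switch_num -= num
--     return switch_num, case_num
-- ===== SOURCE B (Python) =====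
-- def switch_case_count(key_data):
--     # One reverse pass: walking right-to-left, c accumulates "case" tokens until
--     # a "switch" closes its bucket; buckets are built back-to-front.
--     counts = []
--     c = 0
--     for t in reversed(key_data):
--         if t == "case":
--             c += 1
--         elif t == "switch":
--             counts.append(c)
--             c = 0
--     counts.reverse()
--     k = len(counts)  # number of switches
--     if counts:
--         counts = [counts[0] + c] + counts[1:]  # cases before the first switch merge in
--     else:
--         counts = [c]
--     nonzero = [x for x in counts if x != 0]
--     return k - (len(counts) - len(nonzero)), nonzero
-- ===== Notes on version B (the rewrite author's own statement) =====
-- stated objective: alternative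
-- what changed: B replaces A's forward scan with carried switch-count/temp state plus a repeated list.remove(0) loop by a single reverse pass that builds per-switch case buckets back-to-front, a closed-form merge of the pre-first-switch cases, and one filter for the zero-bucket removal.
import Mathlib
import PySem

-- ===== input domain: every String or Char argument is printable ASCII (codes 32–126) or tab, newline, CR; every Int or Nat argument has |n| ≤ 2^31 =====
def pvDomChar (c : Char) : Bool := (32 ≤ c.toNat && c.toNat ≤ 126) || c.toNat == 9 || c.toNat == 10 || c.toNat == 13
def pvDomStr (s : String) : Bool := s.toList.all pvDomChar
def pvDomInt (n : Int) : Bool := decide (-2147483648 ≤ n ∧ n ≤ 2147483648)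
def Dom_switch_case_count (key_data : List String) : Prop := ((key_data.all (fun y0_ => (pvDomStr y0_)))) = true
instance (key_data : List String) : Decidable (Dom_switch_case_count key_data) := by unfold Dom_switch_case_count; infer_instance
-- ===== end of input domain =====

-- B replaces A's forward scan with carried switch state and its repeated `.remove(0)`
-- loop by a single reverse pass building buckets back-to-front plus a filter
-- (objective: alternative decomposition; return value proved equal on all inputs).

-- ===== PORT A =====
-- one loop iteration of A's main for-loop
def pvStepA (st : List Int × Int × Int) (value : String) : List Int × Int × Int :=
  let st1 := if value == "switch" then
      (if st.2.1 > 0 then (st.1 ++ [st.2.2], st.2.1 + 1, (0 : Int))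
       else (st.1, st.2.1 + 1, st.2.2))
    else st
  if value == "case" then (st1.1, st1.2.1, st1.2.2 + 1) else st1

def switch_case_count (key_data : List String) : Int × List Int :=
  let f := key_data.foldl pvStepA ([], 0, 0)
  let case_num := f.1 ++ [f.2.2]
  let switch_num := f.2.1
  let num : Nat := case_num.count 0
  let case_num := (PySem.List.pyRange 0 (num : Int) 1).foldl
      (fun l _ => (PySem.List.remove? l 0).getD l) case_num
  (switch_num - (num : Int), case_num)

-- ===== PORT B =====
-- one iteration of B's reverse for-loop
def pvStepB (st : List Int × Int) (t : String) : List Int × Int :=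
  if t == "case" then (st.1, st.2 + 1)
  else if t == "switch" then (st.1 ++ [st.2], 0) else st

def switch_case_count_alt (key_data : List String) : Int × List Int :=
  let s := key_data.reverse.foldl pvStepB ([], 0)
  let counts := s.1.reverse
  let k : Int := counts.length
  let counts := match counts with
    | [] => [s.2]
    | h :: t => (h + s.2) :: t
  let nonzero := counts.filter (fun x => x != 0)
  (k - ((counts.length : Int) - (nonzero.length : Int)), nonzero)

-- ===== PRECONDITION & SPEC =====
def Spec_switch_case_count (key_data : List String) (out : Int × List Int) : Prop := out = switch_case_count_alt key_data
instance (key_data : List String) (out : Int × List Int) : Decidable (Spec_switch_case_count key_data out) := by unfold Spec_switch_case_count; infer_instance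

-- ===== CLAIM (what is proved, stated in full; the proofs are below) =====
def Claim_equal_switch_case_count : Prop := ∀ (key_data : List String), Dom_switch_case_count key_data → Spec_switch_case_count key_data (switch_case_count key_data)

-- ===== LEMMAS AND PROOFS =====

-- cases before the first "switch"
def pvPreC : List String → Int
  | [] => 0
  | v :: r => if v = "switch" then 0 else if v = "case" then pvPreC r + 1 else pvPreC r

-- per-switch buckets: cases strictly between each switch and the next
def pvInner : List String → List Int
  | [] => []
  | v :: r => if v = "switch" then pvPreC r :: pvInner r else pvInner r

-- the list case_num ++ [temp_case] produced by A's main loop from temp tc,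
-- ins = whether a switch has been seen (switch_num > 0)
def pvBk : List String → Int → Bool → List Int
  | [], tc, _ => [tc]
  | v :: r, tc, ins =>
      if v = "switch" then (if ins then tc :: pvBk r 0 true else pvBk r tc true)
      else if v = "case" then pvBk r (tc + 1) ins
      else pvBk r tc ins

theorem pvStepA_switch_pos (cn : List Int) (sn tc : Int) (h : sn > 0) :
    pvStepA (cn, sn, tc) "switch" = (cn ++ [tc], sn + 1, 0) := by
  simp [pvStepA, h]

theorem pvStepA_switch_npos (cn : List Int) (sn tc : Int) (h : ¬ sn > 0) :
    pvStepA (cn, sn, tc) "switch" = (cn, sn + 1, tc) := by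
  simp [pvStepA, h]

theorem pvStepA_case (cn : List Int) (sn tc : Int) :
    pvStepA (cn, sn, tc) "case" = (cn, sn, tc + 1) := by
  simp [pvStepA]

theorem pvStepA_other (cn : List Int) (sn tc : Int) (v : String)
    (hv : v ≠ "switch") (hc : v ≠ "case") : pvStepA (cn, sn, tc) v = (cn, sn, tc) := by
  have hv' : (v == "switch") = false := by simpa using hv
  have hc' : (v == "case") = false := by simpa using hc
  simp [pvStepA, hv', hc']

theorem pvLoopA (l : List String) : ∀ (cn : List Int) (sn tc : Int), 0 ≤ sn →
    (l.foldl pvStepA (cn, sn, tc)).2.1 = sn + (l.count "switch" : Int) ∧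
    (l.foldl pvStepA (cn, sn, tc)).1 ++ [(l.foldl pvStepA (cn, sn, tc)).2.2]
      = cn ++ pvBk l tc (decide (0 < sn)) := by
  induction l with
  | nil => intro cn sn tc _; simp [pvBk]
  | cons v r ih =>
    intro cn sn tc hsn
    by_cases hv : v = "switch"
    · subst hv
      by_cases hpos : sn > 0
      · obtain ⟨h1, h2⟩ := ih (cn ++ [tc]) (sn + 1) 0 (by omega)
        rw [List.foldl_cons, pvStepA_switch_pos cn sn tc hpos]
        refine ⟨by rw [h1]; simp [List.count_cons]; ring, ?_⟩
        rw [h2]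
        have e1 : decide (0 < sn + 1) = true := by simp; omega
        have e2 : decide (0 < sn) = true := by simpa using hpos
        simp only [pvBk, if_pos rfl, e2]
        simp [hsn]
      · obtain ⟨h1, h2⟩ := ih cn (sn + 1) tc (by omega)
        rw [List.foldl_cons, pvStepA_switch_npos cn sn tc hpos]
        refine ⟨by rw [h1]; simp [List.count_cons]; ring, ?_⟩
        rw [h2]
        have e1 : decide (0 < sn + 1) = true := by simp; omega
        have e2 : decide (0 < sn) = false := by simpa using hpos
        simp only [pvBk, if_pos rfl, e2]
        simp [hsn]
    · by_cases hc : v = "case"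
      · subst hc
        obtain ⟨h1, h2⟩ := ih cn sn (tc + 1) hsn
        rw [List.foldl_cons, pvStepA_case]
        refine ⟨by rw [h1]; simp [List.count_cons], ?_⟩
        rw [h2]
        simp only [pvBk]
        simp
      · obtain ⟨h1, h2⟩ := ih cn sn tc hsn
        rw [List.foldl_cons, pvStepA_other cn sn tc v hv hc]
        refine ⟨by rw [h1]; simp [List.count_cons, hv], ?_⟩
        rw [h2]
        simp only [pvBk, if_neg hv, if_neg hc]

theorem pvLoopB (l : List String) :
    l.foldr (fun t st => pvStepB st t) ([], 0) = ((pvInner l).reverse, pvPreC l) := by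
  induction l with
  | nil => simp [pvInner, pvPreC]
  | cons v r ih =>
    rw [List.foldr_cons, ih]
    by_cases hc : v = "case"
    · subst hc; simp [pvStepB, pvInner, pvPreC]
    · by_cases hv : v = "switch"
      · subst hv; simp [pvStepB, pvInner, pvPreC]
      · have hv' : (v == "switch") = false := by simpa using hv
        have hc' : (v == "case") = false := by simpa using hc
        simp [pvStepB, pvInner, pvPreC, hv, hc, hv', hc']

theorem pvBk_true (r : List String) : ∀ tc, pvBk r tc true = (tc + pvPreC r) :: pvInner r := by
  induction r with
  | nil => intro tc; simp [pvBk, pvPreC, pvInner]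
  | cons v r ih =>
    intro tc
    by_cases hv : v = "switch"
    · subst hv; simp [pvBk, pvPreC, pvInner, ih]
    · by_cases hc : v = "case"
      · subst hc; simp [pvBk, pvPreC, pvInner, ih]; ring_nf
      · simp only [pvBk, pvPreC, pvInner, if_neg hv, if_neg hc]
        exact ih tc

theorem pvBk_false (l : List String) : ∀ tc, pvBk l tc false =
    (match pvInner l with
     | [] => [tc + pvPreC l]
     | h :: t => (tc + pvPreC l + h) :: t) := by
  induction l with
  | nil => intro tc; simp [pvBk, pvPreC, pvInner]
  | cons v r ih =>
    intro tc
    by_cases hv : v = "switch"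
    · subst hv
      simp only [pvBk, pvPreC, pvInner, if_pos rfl]
      simpa using pvBk_true r tc
    · by_cases hc : v = "case"
      · subst hc
        simp only [pvBk, pvPreC, pvInner, if_neg hv, if_pos rfl]
        rw [ih]
        cases h : pvInner r
        · simp; ring_nf
        · simp; ring_nf
      · simp only [pvBk, pvPreC, pvInner, if_neg hv, if_neg hc]
        exact ih tc

theorem pvInner_length (l : List String) : (pvInner l).length = l.count "switch" := by
  induction l with
  | nil => simp [pvInner]
  | cons v r ih =>
    by_cases hv : v = "switch"
    · subst hv; simp [pvInner, List.count_cons, ih]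
    · simp [pvInner, List.count_cons, hv, ih]

-- a fold that ignores its elements is an iterate
theorem pvFoldl_const {α β : Type} (g : β → β) (xs : List α) : ∀ (b : β),
    xs.foldl (fun b _ => g b) b = g^[xs.length] b := by
  induction xs with
  | nil => intro b; simp
  | cons x xs ih => intro b; simp [ih, Function.iterate_succ_apply]

theorem pvFilter_erase (L : List Int) (h : (0:Int) ∈ L) :
    (L.erase 0).filter (fun x => x != 0) = L.filter (fun x => x != 0) := by
  induction L with
  | nil => simp at h
  | cons a L ih =>
    by_cases ha : a = 0
    · subst ha; simp [List.erase_cons]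
    · have ha' : (a == (0:Int)) = false := by simpa using ha
      have h0 : (0:Int) ∈ L := by
        rcases List.mem_cons.mp h with h | h
        · exact absurd h.symm ha
        · exact h
      simp [List.erase_cons, ha', List.filter_cons, ih h0]

theorem pvRemoveIter (n : Nat) : ∀ (L : List Int), L.count 0 = n →
    (fun l => (PySem.List.remove? l 0).getD l)^[n] L = L.filter (fun x => x != 0) := by
  induction n with
  | zero =>
    intro L h
    have hnm : (0:Int) ∉ L := List.count_eq_zero.mp h
    simp only [Function.iterate_zero, id_eq]
    exact (List.filter_eq_self.mpr (fun a ha => by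
      have : a ≠ 0 := fun e => hnm (e ▸ ha)
      simpa using this)).symm
  | succ n ih =>
    intro L h
    have hmem : (0:Int) ∈ L := List.count_pos_iff.mp (by omega)
    rw [Function.iterate_succ_apply]
    have hrm : PySem.List.remove? L 0 = some (L.erase 0) :=
      PySem.List.remove?_eq_some_erase L 0 hmem
    simp only [hrm, Option.getD_some]
    rw [ih (L.erase 0) (by rw [List.count_erase_self]; omega)]
    exact pvFilter_erase L hmem

theorem pvCount_zero (L : List Int) :
    (L.count 0 : Int) = (L.length : Int) - ((L.filter (fun x => x != 0)).length : Int) := by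
  induction L with
  | nil => simp
  | cons a L ih =>
    by_cases ha : a = 0
    · subst ha; simp [List.count_cons, List.filter_cons]; omega
    · have ha' : (a == (0:Int)) = false := by simpa using ha
      simp [List.count_cons, List.filter_cons, ha, ha', ih]

-- ===== VERDICT (by name: the statement is the Claim_ definition above) =====
theorem switch_case_count_spec : Claim_equal_switch_case_count := by
  intro key_data _
  unfold Spec_switch_case_count switch_case_count switch_case_count_alt
  obtain ⟨hSn, hList⟩ := pvLoopA key_data [] 0 0 le_rfl
  simp only [List.nil_append] at hList
  rw [List.foldl_reverse]
  have hB : key_data.foldr (fun t st => pvStepB st t) ([], 0)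
      = ((pvInner key_data).reverse, pvPreC key_data) := pvLoopB key_data
  simp only [hB, List.reverse_reverse]
  -- normalize A's removal loop to a filter
  set f := key_data.foldl pvStepA ([], 0, 0) with hf
  set CN := f.1 ++ [f.2.2] with hCN
  have hCNval : CN = pvBk key_data 0 false := hList
  have hrange : (PySem.List.pyRange 0 ((CN.count 0 : Nat) : Int) 1).length = CN.count 0 := by
    rw [PySem.List.length_pyRange_one]; simp
  have hrem : (PySem.List.pyRange 0 ((CN.count 0 : Nat) : Int) 1).foldl
      (fun l _ => (PySem.List.remove? l 0).getD l) CN = CN.filter (fun x => x != 0) := by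
    rw [pvFoldl_const, hrange, pvRemoveIter (CN.count 0) CN rfl]
  simp only [hrem]
  -- now compare the two pairs
  have hC2 : CN = (match pvInner key_data with
      | [] => [pvPreC key_data]
      | h :: t => (h + pvPreC key_data) :: t) := by
    rw [hCNval, pvBk_false]
    cases pvInner key_data with
    | nil => simp
    | cons h t => simp; ring
  rw [hC2]
  simp only [Prod.mk.injEq]
  refine ⟨?_, trivial⟩
  rw [hSn]
  have hc0 := pvCount_zero (match pvInner key_data with
      | [] => [pvPreC key_data]
      | h :: t => (h + pvPreC key_data) :: t)
  have hlen := pvInner_length key_data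
  omega
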